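-- pv_equiv track=rewrite | github.com/richardnguyen0715/tgng.leet | nvidia-try-hard/Single-Threaded CPU Simulation.py | solution
-- ===== SOURCE A (Python) =====
-- import heapq
--
-- def solution(tasks):
--
--     # arrival time - processing time
--     tasks = sorted(tasks, key = lambda x : x [0])
--
--     n = len(tasks)
--     result = [0] * n
--     heap = []
--
--     current_time = 0
--     i = 0
--
--     while i < n or heap:
--         if not heap:
--             current_time = tasks[i][0]
--
--         while i < n and tasks[i][0] <= current_time:
--             heapq.heappush(heap, (tasks[i][1], tasks[i][2]))
--             i += 1
--
--         proc, idx = heapq.heappop(heap)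
--         current_time += proc
--
--         result[idx] = current_time
--
--     return result
-- ===== SOURCE B (Python) =====
-- def solution(tasks):
--     # Same schedule, but the priority queue is a plain list scanned
--     # linearly for the minimal (processing, index) pair instead of a heap.
--     order = sorted(tasks, key=lambda x: x[0])
--     n = len(order)
--     result = [0] * n
--     available = []
--     current_time = 0
--     i = 0
--     while i < n or available:
--         if not available:
--             current_time = order[i][0]
--         while i < n and order[i][0] <= current_time:
--             available.append((order[i][1], order[i][2]))
--             i += 1
--         best = available[0]
--         for x in available[1:]:
--             if x < best:
--                 best = x
--         available.remove(best)
--         current_time += best[0]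
--         result[best[1]] = current_time
--     return result
-- ===== Notes on version B (the rewrite author's own statement) =====
-- stated objective: simpler
-- what changed: Replaces the heapq priority queue by a plain available list that is scanned linearly for the minimal (processing, index) pair and removed from, keeping the same sort-by-arrival outer loop.
import Mathlib
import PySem

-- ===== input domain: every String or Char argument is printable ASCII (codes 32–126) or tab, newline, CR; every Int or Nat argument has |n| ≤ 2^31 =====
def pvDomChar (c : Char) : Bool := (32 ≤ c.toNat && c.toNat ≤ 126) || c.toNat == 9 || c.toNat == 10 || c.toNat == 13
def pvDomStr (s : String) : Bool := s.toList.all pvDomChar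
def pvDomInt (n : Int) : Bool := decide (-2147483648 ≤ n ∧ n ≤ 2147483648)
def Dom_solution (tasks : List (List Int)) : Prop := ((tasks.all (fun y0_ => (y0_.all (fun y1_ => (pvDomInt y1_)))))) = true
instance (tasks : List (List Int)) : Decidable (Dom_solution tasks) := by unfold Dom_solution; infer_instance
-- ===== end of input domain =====

-- B replaces A's heapq priority queue by a plain list scanned linearly for the
-- minimal (processing, index) pair: simpler (no heap), same schedule and return value.

-- Python tuple comparison (p, i) < (q, j): lexicographic on two ints.
def pvLt (a b : Int × Int) : Bool := a.1 < b.1 || (a.1 == b.1 && a.2 < b.2)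

-- shared refill step: jump of current_time when the queue is empty, and the
-- arrived prefix / remaining suffix of the (sorted) task list
def pvJump (queue : List (Int × Int)) (rem : List (List Int)) (t : Int) : Int :=
  if queue.isEmpty then (rem.headD []).getD 0 0 else t
def pvReady (t1 : Int) (rem : List (List Int)) : List (List Int) :=
  rem.takeWhile (fun task => decide (task.getD 0 0 ≤ t1))
def pvRest (t1 : Int) (rem : List (List Int)) : List (List Int) :=
  rem.dropWhile (fun task => decide (task.getD 0 0 ≤ t1))

-- ===== PORT A =====
-- heapq is modelled by a list kept in ascending (processing, idx) order:
-- heappush = ordered insert, heappop = take the head — exact for every value A observes.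
def pvHeapPush : List (Int × Int) → (Int × Int) → List (Int × Int)
  | [], x => [x]
  | y :: ys, x => if pvLt x y then x :: y :: ys else y :: pvHeapPush ys x

theorem pvHeapPush_length (h : List (Int × Int)) (x : Int × Int) :
    (pvHeapPush h x).length = h.length + 1 := by
  induction h with
  | nil => rfl
  | cons y ys ih => simp only [pvHeapPush]; split <;> simp [ih]

theorem pvFoldPush_length (l : List (List Int)) (h : List (Int × Int)) :
    (l.foldl (fun hp task => pvHeapPush hp (task.getD 1 0, task.getD 2 0)) h).length
      = h.length + l.length := by
  induction l generalizing h with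
  | nil => rfl
  | cons a l ih =>
    simp only [List.foldl_cons]
    rw [ih, pvHeapPush_length]
    simp only [List.length_cons]; omega

theorem pvReadyRest_length (t1 : Int) (rem : List (List Int)) :
    (pvReady t1 rem).length + (pvRest t1 rem).length = rem.length := by
  unfold pvReady pvRest
  rw [← List.length_append, List.takeWhile_append_dropWhile]

-- the Python while-loop of A: rem = tasks not yet pushed, heap = the heapq list,
-- t = current_time, res = result; the '[]' branch is the loop exit (no task left, heap empty)
def pvLoopA (rem : List (List Int)) (heap : List (Int × Int)) (t : Int) (res : List Int) : List Int :=
  match hm : (pvReady (pvJump heap rem t) rem).foldl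
      (fun hp task => pvHeapPush hp (task.getD 1 0, task.getD 2 0)) heap with
  | [] => res
  | b :: hs =>
    pvLoopA (pvRest (pvJump heap rem t) rem) hs (pvJump heap rem t + b.1)
      (PySem.List.pySetD res b.2 (pvJump heap rem t + b.1))
termination_by rem.length + heap.length
decreasing_by
  have e1 := pvReadyRest_length (pvJump heap rem t) rem
  have e2 := pvFoldPush_length (pvReady (pvJump heap rem t) rem) heap
  rw [hm] at e2
  simp only [List.length_cons] at e2
  omega

def solution (tasks : List (List Int)) : List Int :=
  let ts := PySem.List.sorted tasks (fun x => x.getD 0 0) false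
  pvLoopA ts [] 0 (List.replicate tasks.length 0)

-- ===== PORT B =====
-- 'best = available[0]; for x in available[1:]: if x < best: best = x'
def pvScan (l : List (Int × Int)) (a : Int × Int) : Int × Int :=
  l.foldl (fun best x => if pvLt x best then x else best) a

theorem pvScan_mem (l : List (Int × Int)) (a : Int × Int) : pvScan l a ∈ a :: l := by
  induction l generalizing a with
  | nil => simp [pvScan]
  | cons x xs ih =>
    have step : pvScan (x :: xs) a = pvScan xs (if pvLt x a then x else a) := rfl
    rw [step]
    rcases List.mem_cons.mp (ih (if pvLt x a then x else a)) with h | h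
    · rw [h]; split <;> simp
    · simp [h]

-- B's while-loop: avail = the unordered available list, same rem/t/res as A
def pvLoopB (rem : List (List Int)) (avail : List (Int × Int)) (t : Int) (res : List Int) : List Int :=
  match hm : avail ++ (pvReady (pvJump avail rem t) rem).map
      (fun task => (task.getD 1 0, task.getD 2 0)) with
  | [] => res
  | a :: rest2 =>
    pvLoopB (pvRest (pvJump avail rem t) rem)
      ((PySem.List.remove? (a :: rest2) (pvScan rest2 a)).getD [])
      (pvJump avail rem t + (pvScan rest2 a).1)
      (PySem.List.pySetD res (pvScan rest2 a).2 (pvJump avail rem t + (pvScan rest2 a).1))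
termination_by rem.length + avail.length
decreasing_by
  have e1 := pvReadyRest_length (pvJump avail rem t) rem
  have e2 := congrArg List.length hm
  simp only [List.length_append, List.length_map, List.length_cons] at e2
  have hmem := pvScan_mem rest2 a
  simp only [PySem.List.remove?_eq_some_erase _ _ hmem, Option.getD_some]
  have h3 := List.length_erase_of_mem hmem
  simp only [List.length_cons] at h3 ⊢
  omega

def solution_alt (tasks : List (List Int)) : List Int :=
  let ts := PySem.List.sorted tasks (fun x => x.getD 0 0) false
  pvLoopB ts [] 0 (List.replicate tasks.length 0)

-- ===== PRECONDITION & SPEC =====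
-- Pre_ excludes exactly the inputs where the Python A raises: a task with fewer than
-- 3 fields (IndexError on task[0]/task[1]/task[2]) or a stored index outside
-- [-n, n) (IndexError on result[idx]).
def Pre_solution (tasks : List (List Int)) : Prop :=
  ∀ task ∈ tasks, 3 ≤ task.length ∧
    -(tasks.length : Int) ≤ task.getD 2 0 ∧ task.getD 2 0 < tasks.length
instance (tasks : List (List Int)) : Decidable (Pre_solution tasks) := by
  unfold Pre_solution; infer_instance
def pvWitness_solution : List (List Int) := [[2, 3, 1], [0, 1, 0]]
def Spec_solution (tasks : List (List Int)) (out : List Int) : Prop := out = solution_alt tasks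
instance (tasks : List (List Int)) (out : List Int) : Decidable (Spec_solution tasks out) := by unfold Spec_solution; infer_instance

-- ===== CLAIM (what is proved, stated in full; the proofs are below) =====
def Claim_equal_solution : Prop := ∀ (tasks : List (List Int)), Dom_solution tasks → Pre_solution tasks → Spec_solution tasks (solution tasks)

-- ===== LEMMAS AND PROOFS =====

theorem pvLt_trans {a b c : Int × Int} (h1 : pvLt a b = true) (h2 : pvLt b c = true) :
    pvLt a c = true := by
  obtain ⟨a1, a2⟩ := a; obtain ⟨b1, b2⟩ := b; obtain ⟨c1, c2⟩ := c
  simp [pvLt] at *; omega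

theorem pvLt_irrefl (a : Int × Int) : pvLt a a = false := by
  obtain ⟨a1, a2⟩ := a; simp [pvLt]

theorem pvLt_asymm {a b : Int × Int} (h : pvLt a b = true) : pvLt b a = false := by
  obtain ⟨a1, a2⟩ := a; obtain ⟨b1, b2⟩ := b; simp [pvLt] at *; omega

theorem pvLt_eq_of_not {a b : Int × Int} (h1 : pvLt a b = false) (h2 : pvLt b a = false) :
    a = b := by
  obtain ⟨a1, a2⟩ := a; obtain ⟨b1, b2⟩ := b; simp [pvLt] at *; omega

theorem pvHeapPush_perm (h : List (Int × Int)) (x : Int × Int) :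
    (pvHeapPush h x).Perm (x :: h) := by
  induction h with
  | nil => rfl
  | cons y ys ih =>
    simp only [pvHeapPush]; split
    · exact List.Perm.refl _
    · exact ((ih.cons y).trans (List.Perm.swap x y ys))

theorem pvHeapPush_sorted {h : List (Int × Int)} (x : Int × Int)
    (hs : h.Pairwise (fun u v => pvLt v u = false)) :
    (pvHeapPush h x).Pairwise (fun u v => pvLt v u = false) := by
  induction h with
  | nil => simp [pvHeapPush]
  | cons y ys ih =>
    rw [List.pairwise_cons] at hs
    simp only [pvHeapPush]; split
    · rename_i hlt
      rw [List.pairwise_cons]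
      refine ⟨?_, List.pairwise_cons.mpr hs⟩
      intro z hz
      rcases List.mem_cons.mp hz with rfl | hz
      · exact pvLt_asymm hlt
      · cases hc : pvLt z x with
        | false => rfl
        | true =>
          have := pvLt_trans hc hlt
          rw [hs.1 z hz] at this; cases this
    · rename_i hnlt
      rw [List.pairwise_cons]
      refine ⟨?_, ih hs.2⟩
      intro z hz
      have hz' := (pvHeapPush_perm ys x).mem_iff.mp hz
      rcases List.mem_cons.mp hz' with rfl | hz'
      · simpa using hnlt
      · exact hs.1 z hz'

theorem pvFoldPush_perm (l : List (List Int)) (h : List (Int × Int)) :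
    (l.foldl (fun hp task => pvHeapPush hp (task.getD 1 0, task.getD 2 0)) h).Perm
      (h ++ l.map (fun task => (task.getD 1 0, task.getD 2 0))) := by
  induction l generalizing h with
  | nil => simp
  | cons a l ih =>
    simp only [List.foldl_cons, List.map_cons]
    refine (ih _).trans ?_
    refine (((pvHeapPush_perm h _).append_right _).trans ?_)
    exact (List.perm_middle).symm

theorem pvFoldPush_sorted (l : List (List Int)) {h : List (Int × Int)}
    (hs : h.Pairwise (fun u v => pvLt v u = false)) :
    (l.foldl (fun hp task => pvHeapPush hp (task.getD 1 0, task.getD 2 0)) h).Pairwise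
      (fun u v => pvLt v u = false) := by
  induction l generalizing h with
  | nil => exact hs
  | cons a l ih => exact ih (pvHeapPush_sorted _ hs)

theorem pvLt_false_trans {z w s : Int × Int} (h1 : pvLt z w = false)
    (h2 : pvLt w s = false) : pvLt z s = false := by
  obtain ⟨z1, z2⟩ := z; obtain ⟨w1, w2⟩ := w; obtain ⟨s1, s2⟩ := s
  simp [pvLt] at *; omega

theorem pvScan_min (l : List (Int × Int)) (a : Int × Int) :
    ∀ y ∈ a :: l, pvLt y (pvScan l a) = false := by
  induction l generalizing a with
  | nil =>
    intro y hy; simp at hy; subst hy; simp [pvScan, pvLt_irrefl]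
  | cons x xs ih =>
    intro y hy
    rw [show pvScan (x :: xs) a = pvScan xs (if pvLt x a then x else a) from rfl]
    have hself : pvLt (if pvLt x a then x else a)
        (pvScan xs (if pvLt x a then x else a)) = false :=
      ih (if pvLt x a then x else a) _ List.mem_cons_self
    rcases List.mem_cons.mp hy with rfl | hy
    · refine pvLt_false_trans ?_ hself
      split
      · exact pvLt_asymm (by assumption)
      · exact pvLt_irrefl _
    · rcases List.mem_cons.mp hy with rfl | hy
      · refine pvLt_false_trans ?_ hself
        split
        · exact pvLt_irrefl _
        · rename_i h; simpa using h
      · exact ih (if pvLt x a then x else a) y (List.mem_cons_of_mem _ hy)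

-- head of the sorted heap = the linear-scan minimum of any permutation of it
theorem pvHead_eq_scan {b : Int × Int} {hs : List (Int × Int)} {a : Int × Int}
    {rest2 : List (Int × Int)}
    (hsort : (b :: hs).Pairwise (fun u v => pvLt v u = false))
    (hperm : (b :: hs).Perm (a :: rest2)) :
    b = pvScan rest2 a := by
  have hb_min : ∀ y ∈ b :: hs, pvLt y b = false := by
    intro y hy
    rcases List.mem_cons.mp hy with rfl | hy
    · exact pvLt_irrefl y
    · exact (List.pairwise_cons.mp hsort).1 y hy
  have hscan_mem : pvScan rest2 a ∈ b :: hs := hperm.mem_iff.mpr (pvScan_mem rest2 a)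
  have hb_mem : b ∈ a :: rest2 := hperm.mem_iff.mp List.mem_cons_self
  exact pvLt_eq_of_not (pvScan_min rest2 a b hb_mem) (hb_min _ hscan_mem)

theorem pvLoop_eq (n : Nat) : ∀ (rem : List (List Int)) (heap avail : List (Int × Int))
    (t : Int) (res : List Int), rem.length + heap.length ≤ n →
    heap.Pairwise (fun u v => pvLt v u = false) → heap.Perm avail →
    pvLoopA rem heap t res = pvLoopB rem avail t res := by
  induction n with
  | zero =>
    intro rem heap avail t res hlen _ hperm
    have h1 : rem = [] := by cases rem <;> simp_all
    have h2 : heap = [] := by cases heap <;> simp_all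
    have h3 : avail = [] := by subst h2; exact hperm.symm.eq_nil
    subst h1 h2 h3
    rw [pvLoopA.eq_def, pvLoopB.eq_def]
    simp [pvReady, pvJump]
  | succ n ih =>
    intro rem heap avail t res hlen hsort hperm
    have hempty : heap.isEmpty = avail.isEmpty := by
      cases heap <;> cases avail <;> simp_all [hperm.length_eq]
    have hj : pvJump avail rem t = pvJump heap rem t := by
      simp [pvJump, hempty]
    set t1 := pvJump heap rem t with ht1
    have hHperm : ((pvReady t1 rem).foldl
        (fun hp task => pvHeapPush hp (task.getD 1 0, task.getD 2 0)) heap).Perm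
        (avail ++ (pvReady t1 rem).map (fun task => (task.getD 1 0, task.getD 2 0))) :=
      (pvFoldPush_perm _ _).trans (hperm.append_right _)
    have hHsort := pvFoldPush_sorted (pvReady t1 rem) hsort
    rw [pvLoopA.eq_def, pvLoopB.eq_def, hj]
    split <;> split
    · rfl
    · rename_i h1 a rest2 h2
      rw [h1] at hHperm; rw [h2] at hHperm
      cases hHperm.symm.eq_nil
    · rename_i b hs h1 h2
      rw [h1] at hHperm; rw [h2] at hHperm
      cases hHperm.eq_nil
    · rename_i b hs h1 a rest2 h2
      rw [h1] at hHperm hHsort; rw [h2] at hHperm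
      have hb : b = pvScan rest2 a := pvHead_eq_scan hHsort hHperm
      have hmem := pvScan_mem rest2 a
      rw [PySem.List.remove?_eq_some_erase _ _ hmem, Option.getD_some]
      have herase : ((a :: rest2).erase (pvScan rest2 a)).Perm hs := by
        rw [← hb]
        have h3 := (hHperm.erase b).symm
        rwa [List.erase_cons_head] at h3
      have e1 := pvReadyRest_length t1 rem
      have e2 := pvFoldPush_length (pvReady t1 rem) heap
      rw [h1] at e2; simp only [List.length_cons] at e2
      have hlen' : (pvRest t1 rem).length + hs.length ≤ n := by omega
      rw [hb]
      exact ih _ _ _ _ _ hlen' (List.pairwise_cons.mp hHsort).2 herase.symm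

-- ===== VERDICT (by name: the statement is the Claim_ definition above) =====
theorem solution_spec : Claim_equal_solution := by
  intro tasks _ _
  unfold Spec_solution solution solution_alt
  exact pvLoop_eq ((PySem.List.sorted tasks (fun x => x.getD 0 0) false).length)
    _ [] [] 0 _ (by simp) (by simp) (List.Perm.refl _)
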